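-- pv_equiv track=rewrite | github.com/quattor/pan | panc/src/main/scripts/panlint/panlint.py | merge_diagnoses
-- ===== SOURCE A (Python) =====
-- def merge_diagnoses(args):
--     """Merge lines of diagnosis produced by diagnose()"""
--     if not args:
--         return ''
--
--     args = [a.rstrip() for a in args]
--     result = [' '] * max([len(a) for a in args])
--
--     for text in args:
--         for i, c in enumerate(text):
--             if c != ' ':
--                 result[i] = c
--     return u''.join(result).rstrip()
-- ===== SOURCE B (Python) =====
-- def merge_diagnoses(args):
--     """Merge lines of diagnosis produced by diagnose()"""
--     if not args:
--         return ''
--     stripped = [a.rstrip() for a in args]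
--     width = max((len(s) for s in stripped), default=0)
--
--     def col(j):
--         # last input wins: scan the inputs back-to-front, take the first non-space
--         return next((s[j] for s in reversed(stripped) if j < len(s) and s[j] != ' '), ' ')
--
--     return ''.join(col(j) for j in range(width)).rstrip()
-- ===== Notes on version B (the rewrite author's own statement) =====
-- stated objective: alternative
-- what changed: B computes the merged line column-by-column (for each output position, scan the inputs back-to-front and take the first non-space character there, stopping early), instead of A's row-by-row overlay onto a mutable buffer of spaces.
import Mathlib
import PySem

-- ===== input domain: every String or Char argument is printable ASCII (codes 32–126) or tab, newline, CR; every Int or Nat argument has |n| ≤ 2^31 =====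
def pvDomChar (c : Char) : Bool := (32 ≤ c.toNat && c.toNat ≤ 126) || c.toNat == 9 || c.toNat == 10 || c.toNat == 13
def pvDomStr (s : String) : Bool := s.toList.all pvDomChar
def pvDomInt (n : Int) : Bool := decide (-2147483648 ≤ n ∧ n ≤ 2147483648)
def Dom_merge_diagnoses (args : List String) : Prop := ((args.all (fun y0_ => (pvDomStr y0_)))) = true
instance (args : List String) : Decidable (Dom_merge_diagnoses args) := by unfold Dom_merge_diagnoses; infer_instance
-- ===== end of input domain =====

-- B recomputes the merge column-by-column (for each output position, the last input holding a
-- non-space there), replacing A's row-by-row mutable overlay buffer; objective: alternative decomposition.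

-- ===== PORT A =====
-- row-major: overlay every input onto a mutable buffer of spaces, later inputs overwrite
def merge_diagnoses (args : List String) : String :=
  if args = [] then "" else
    let ts := args.map (fun a => PySem.Chars.rstrip a.toList)
    -- max([len(a) for a in args]); under the guard args ≠ [] the list is nonempty, so max? is `some`
    let w : Int := (PySem.List.max? (ts.map (fun a => PySem.List.len a)) (fun x => x)).getD 0
    let buf := ts.foldl (fun res text =>
        (PySem.List.enumerate text).foldl (fun res ic =>
          if ic.2 ≠ ' ' then PySem.List.pySetD res ic.1 ic.2 else res) res)
      (List.replicate w.toNat ' ')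
    PySem.Str.rstrip (String.ofList buf)

-- ===== PORT B =====
-- column-major: for each column j pick the last input's non-space char at j, no mutable buffer
def merge_diagnoses_alt (args : List String) : String :=
  if args = [] then "" else
    let ts := args.map (fun a => PySem.Chars.rstrip a.toList)
    let w := PySem.List.maxD (ts.map (fun s => s.length)) (fun x => x) 0
    PySem.Str.rstrip (String.ofList ((List.range w).map (fun j =>
      (ts.reverse.findSome? (fun s =>
        if j < s.length ∧ s.getD j ' ' ≠ ' ' then some (s.getD j ' ') else none)).getD ' ')))

-- ===== PRECONDITION & SPEC =====
def Spec_merge_diagnoses (args : List String) (out : String) : Prop := out = merge_diagnoses_alt args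
instance (args : List String) (out : String) : Decidable (Spec_merge_diagnoses args out) := by unfold Spec_merge_diagnoses; infer_instance

-- ===== CLAIM (what is proved, stated in full; the proofs are below) =====
def Claim_equal_merge_diagnoses : Prop := ∀ (args : List String), Dom_merge_diagnoses args → Spec_merge_diagnoses args (merge_diagnoses args)

-- ===== LEMMAS AND PROOFS =====

-- the inner Python loop `for i, c in enumerate(text): if c != ' ': result[i] = c`, over any pair list
lemma pvStep_length (l : List (Int × Char)) (res : List Char) :
    (l.foldl (fun res ic => if ic.2 ≠ ' ' then PySem.List.pySetD res ic.1 ic.2 else res) res).length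
      = res.length := by
  induction l generalizing res with
  | nil => rfl
  | cons x l ih =>
      simp only [List.foldl_cons]
      rw [ih]
      split <;> simp [PySem.List.length_pySetD]

lemma pvInner_get (t res : List Char) (h : t.length ≤ res.length) (j : Nat) :
    ((PySem.List.enumerate t).foldl (fun res ic => if ic.2 ≠ ' ' then PySem.List.pySetD res ic.1 ic.2 else res) res)[j]?
      = if j < t.length ∧ t.getD j ' ' ≠ ' ' then some (t.getD j ' ') else res[j]? := by
  induction t using List.reverseRecOn with
  | nil => simp [PySem.List.enumerate_nil]
  | append_singleton t c ih =>
      have h' : t.length ≤ res.length := by simp at h; omega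
      rw [PySem.List.enumerate_append, List.foldl_append]
      simp only [PySem.List.enumerate_cons, PySem.List.enumerate_nil, List.foldl_cons,
        List.foldl_nil, zero_add]
      simp only [List.length_append, List.length_singleton]
      by_cases hc : c = ' '
      · subst hc
        rw [if_neg (by simp)]
        rw [ih h']
        have hg : ∀ k : Nat, (t ++ [' ']).getD k ' ' = t.getD k ' ' := by
          intro k
          rcases lt_trichotomy k t.length with hk | hk | hk
          · simp [List.getD_eq_getElem?_getD, List.getElem?_append_left hk]
          · subst hk; simp [List.getD_eq_getElem?_getD]
          · simp [List.getD_eq_getElem?_getD, hk, le_of_lt hk]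
        rw [hg]
        by_cases hj : j < t.length
        · simp [hj, Nat.lt_succ_of_lt hj]
        · have : ¬ (j < t.length + 1 ∧ t.getD j ' ' ≠ ' ') := by
            rintro ⟨h1, h2⟩
            have : j = t.length := by omega
            subst this
            simp [List.getD_eq_getElem?_getD] at h2
          simp [hj]
      · rw [if_pos (by simpa using hc)]
        rw [PySem.List.pySetD_natCast, List.getElem?_set]
        by_cases hj : t.length = j
        · subst hj
          rw [if_pos rfl, if_pos (by rw [pvStep_length]; simp at h; omega)]
          simp [hc]
        · rw [if_neg hj, ih h']
          by_cases hlt : j < t.length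
          · simp [hlt, Nat.lt_succ_of_lt hlt]
          · have h1 : ¬ (j < t.length ∧ t.getD j ' ' ≠ ' ') := fun ⟨a, _⟩ => hlt a
            have h2 : ¬ (j < t.length + 1 ∧ (t ++ [c]).getD j ' ' ≠ ' ') := by
              rintro ⟨a, _⟩; exact hj (by omega)
            simp only [if_neg h1]
            rw [if_neg (by simpa using h2)]

lemma pvOverlay_get (ts : List (List Char)) (res : List Char)
    (h : ∀ t ∈ ts, t.length ≤ res.length) (j : Nat) :
    (ts.foldl (fun res text =>
        (PySem.List.enumerate text).foldl (fun res ic =>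
          if ic.2 ≠ ' ' then PySem.List.pySetD res ic.1 ic.2 else res) res) res)[j]?
      = (ts.reverse.findSome? (fun s =>
          if j < s.length ∧ s.getD j ' ' ≠ ' ' then some (s.getD j ' ') else none)).or res[j]? := by
  induction ts generalizing res with
  | nil => simp
  | cons t ts ih =>
      simp only [List.foldl_cons, List.reverse_cons, List.findSome?_append]
      rw [ih _ (fun s hs => by rw [pvStep_length]; exact h s (List.mem_cons_of_mem _ hs))]
      rw [pvInner_get t res (h t List.mem_cons_self) j]
      rw [Option.or_assoc]
      congr 1
      simp only [List.findSome?_cons, List.findSome?_nil]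
      split
      · simp
      · simp

lemma pvFoldl_max_cast (l : List (List Char)) (a : Nat) :
    List.foldl max (a : Int) (l.map (fun s => (s.length : Int)))
      = ((List.foldl max a (l.map List.length) : Nat) : Int) := by
  induction l generalizing a with
  | nil => rfl
  | cons x l ih => simp only [List.map_cons, List.foldl_cons, ← Nat.cast_max, ih]

-- ===== VERDICT (by name: the statement is the Claim_ definition above) =====
theorem merge_diagnoses_spec : Claim_equal_merge_diagnoses := by
  intro args _
  unfold Spec_merge_diagnoses merge_diagnoses merge_diagnoses_alt
  by_cases hargs : args = []
  · simp [hargs]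
  · obtain ⟨a, rest, rfl⟩ : ∃ a rest, args = a :: rest := by
      cases args with
      | nil => exact absurd rfl hargs
      | cons a rest => exact ⟨a, rest, rfl⟩
    rw [if_neg hargs, if_neg hargs]
    simp only [List.map_cons]
    set x := PySem.Chars.rstrip a.toList with hx
    set l := List.map (fun a => PySem.Chars.rstrip a.toList) rest with hl
    set N := List.foldl max x.length (l.map List.length) with hN
    have hbound : ∀ t ∈ x :: l, t.length ≤ N := by
      intro t ht
      rw [hN, List.foldl_map]
      rcases List.mem_cons.mp ht with rfl | ht
      · exact (PySem.List.le_foldl_max_nat l List.length x.length).1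
      · exact (PySem.List.le_foldl_max_nat l List.length x.length).2 t ht
    have hW : (PySem.List.max? (PySem.List.len x :: List.map (fun a => PySem.List.len a) l)
        fun x => x).getD 0 = (N : Int) := by
      simp only [PySem.List.len_eq, PySem.List.max?_id_cons, Option.getD_some,
        pvFoldl_max_cast, hN]
    have hw : PySem.List.maxD (x.length :: List.map (fun s => s.length) l) (fun x => x) 0 = N := by
      simp only [PySem.List.maxD, PySem.List.max?_id_cons, Option.getD_some, hN]
    rw [hW, hw, Int.toNat_natCast]
    apply congrArg
    apply congrArg
    apply List.ext_getElem?
    intro j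
    rw [pvOverlay_get (x :: l) _ (by simpa using hbound) j, List.getElem?_map,
      List.getElem?_replicate]
    by_cases hj : j < N
    · rw [List.getElem?_range hj, if_pos hj, Option.map_some]
      generalize List.findSome? _ ((x :: l).reverse) = F
      cases F <;> rfl
    · have hFn : List.findSome? (fun s =>
          if j < s.length ∧ s.getD j ' ' ≠ ' ' then some (s.getD j ' ') else none)
          ((x :: l).reverse) = none := by
        refine List.findSome?_eq_none_iff.mpr (fun s hs => ?_)
        rw [if_neg]
        rintro ⟨h1, -⟩
        have := hbound s (List.mem_reverse.mp hs)
        omega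
      have hrange : (List.range N)[j]? = none := by
        refine List.getElem?_eq_none ?_
        simpa [List.length_range] using Nat.le_of_not_lt hj
      rw [hFn, hrange, if_neg hj, Option.map_none]
      rfl
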